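-- pv_equiv track=rewrite | github.com/benwatson528/advent-of-code-23 | main/day07/camel_cards.py | convert_joker
-- ===== SOURCE A (Python) =====
-- from collections import Counter
--
-- CARD_SCORES = {"A": 14, "K": 13, "Q": 12, "J": 11, "T": 10} | {str(x): x for x in range(2, 10)}
--
-- def convert_joker(hand_counter):
--     num_jokers = hand_counter["J"]
--     if hand_counter["J"] == 5:
--         return Counter("AAAAA")
--     hand_counter.pop("J")
--     most_keys = [k for k, v in hand_counter.items() if v == max(hand_counter.values())]
--     card_to_increment = most_keys[0] if len(most_keys) == 1 else max(hand_counter.keys(), key=lambda x: CARD_SCORES[x])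
--     hand_counter[card_to_increment] += num_jokers
--     return hand_counter
-- ===== SOURCE B (Python) =====
-- from collections import Counter
--
-- CARD_SCORES = {"A": 14, "K": 13, "Q": 12, "J": 11, "T": 10} | {str(x): x for x in range(2, 10)}
--
-- def convert_joker(hand_counter):
--     num_jokers = hand_counter["J"]
--     if num_jokers == 5:
--         return Counter("AAAAA")
--     hand_counter.pop("J")
--     # stable descending sort by count: ranked[0] is the FIRST key attaining the max
--     # count, and the max count is tied iff ranked[1] carries the same count.
--     ranked = sorted(hand_counter.items(), key=lambda kv: kv[1], reverse=True)
--     if len(ranked) > 1 and ranked[0][1] == ranked[1][1]: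
--         target = max(hand_counter.keys(), key=lambda x: CARD_SCORES[x])
--     else:
--         target = ranked[0][0]
--     hand_counter[target] += num_jokers
--     return hand_counter
-- ===== Notes on version B (the rewrite author's own statement) =====
-- stated objective: alternative
-- what changed: A builds the list of all argmax keys with a comprehension that recomputes max(hand_counter.values()) for every item and then branches on that list's length; B instead stable-sorts the items by count descending once, takes ranked[0] as the first max-count key and detects a tie by comparing ranked[0] with ranked[1], keeping the J read, the ==5 early return, the pop and the CARD_SCORES tie-break unchanged.
import Mathlib
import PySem

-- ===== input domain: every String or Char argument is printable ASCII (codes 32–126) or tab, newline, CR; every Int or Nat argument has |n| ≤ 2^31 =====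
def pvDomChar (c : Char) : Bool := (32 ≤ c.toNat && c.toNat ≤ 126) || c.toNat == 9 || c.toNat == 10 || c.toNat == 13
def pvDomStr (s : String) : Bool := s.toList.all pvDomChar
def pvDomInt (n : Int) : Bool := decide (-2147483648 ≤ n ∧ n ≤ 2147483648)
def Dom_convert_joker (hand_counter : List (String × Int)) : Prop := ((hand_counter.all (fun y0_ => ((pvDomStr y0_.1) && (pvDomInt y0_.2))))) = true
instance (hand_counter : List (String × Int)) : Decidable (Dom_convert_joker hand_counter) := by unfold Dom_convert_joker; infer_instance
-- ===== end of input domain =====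

-- B replaces A's most_keys comprehension (which recomputes max(values) per item and then
-- branches on the list's length) by one stable descending sort of the items by count:
-- ranked[0] is the first max-count key and ranked[1] reveals whether that count is tied.
-- A mutates hand_counter in place (pop + increment); the equivalence proved here is about the
-- RETURN value only.

-- ===== PORT A =====
-- CARD_SCORES
def cardScores : List (String × Int) :=
  [("A", 14), ("K", 13), ("Q", 12), ("J", 11), ("T", 10),
   ("2", 2), ("3", 3), ("4", 4), ("5", 5), ("6", 6), ("7", 7), ("8", 8), ("9", 9)]

-- CARD_SCORES[x]; exact on inputs admitted by Pre_ (in the branch where it is called, every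
-- remaining key is a card key, so the lookup never misses and the KeyError case is excluded)
def cardScore (x : String) : Int := (cardScores.lookup x).getD 0

-- hand_counter.pop("J") : drop the "J" entry (a dict has at most one)
def popJ : List (String × Int) → List (String × Int)
  | [] => []
  | p :: t => if p.1 = "J" then t else p :: popJ t

-- hand_counter[c] += n : update the entry for c in place
def bumpKey (c : String) (n : Int) : List (String × Int) → List (String × Int)
  | [] => []
  | p :: t => if p.1 = c then (p.1, p.2 + n) :: t else p :: bumpKey c n t

def convert_joker (hand_counter : List (String × Int)) : List (String × Int) :=
  match hand_counter.lookup "J" with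
  | none => hand_counter        -- Python raises KeyError here; excluded by Pre_
  | some num_jokers =>
    if num_jokers = 5 then [("A", 5)]          -- Counter("AAAAA")
    else
      let rest := popJ hand_counter
      -- max(hand_counter.values()) raises ValueError on an empty dict (excluded by Pre_): getD 0 there
      let most_keys := (rest.filter (fun p =>
          p.2 == (PySem.List.max? (rest.map Prod.snd) (fun y => y)).getD 0)).map Prod.fst
      let card_to_increment :=
        if most_keys.length = 1 then most_keys.headD ""
        else (PySem.List.max? (rest.map Prod.fst) cardScore).getD ""   -- max? [] only when rest = [], excluded by Pre_
      bumpKey card_to_increment num_jokers rest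

-- ===== PORT B =====
def convert_joker_alt (hand_counter : List (String × Int)) : List (String × Int) :=
  match hand_counter.lookup "J" with
  | none => hand_counter        -- Python raises KeyError here; excluded by Pre_
  | some num_jokers =>
    if num_jokers = 5 then [("A", 5)]          -- Counter("AAAAA")
    else
      let rest := popJ hand_counter
      -- sorted(hand_counter.items(), key=lambda kv: kv[1], reverse=True) : stable descending sort
      let ranked := PySem.List.sorted rest (fun kv => kv.2) true
      let target :=
        if 1 < ranked.length ∧ (ranked.getD 0 ("", 0)).2 = (ranked.getD 1 ("", 0)).2
        then (PySem.List.max? (rest.map Prod.fst) cardScore).getD ""   -- max? [] only when rest = [], excluded by Pre_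
        else (ranked.getD 0 ("", 0)).1   -- ranked[0] raises IndexError on empty rest; excluded by Pre_
      bumpKey target num_jokers rest

-- ===== PRECONDITION & SPEC =====
-- Pre_ = exactly the inputs on which the Python A returns: keys form a dict (no duplicates),
-- "J" is present (else KeyError), and either its count is 5, or the remaining dict is nonempty
-- (else ValueError on max of no values) and, when the top count is not unique, every remaining
-- key is a card key (else KeyError in the CARD_SCORES tie-break).
def Pre_convert_joker (hand_counter : List (String × Int)) : Prop :=
  (hand_counter.map Prod.fst).Nodup ∧ "J" ∈ hand_counter.map Prod.fst ∧
  (hand_counter.lookup "J" = some 5 ∨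
    (let rest := hand_counter.filter (fun p => p.1 ≠ "J")
     rest ≠ [] ∧
     ((rest.map Prod.snd).count (((rest.map Prod.snd).max?).getD 0) = 1 ∨
       ∀ p ∈ rest, p.1 ∈ cardScores.map Prod.fst)))
instance (hand_counter : List (String × Int)) : Decidable (Pre_convert_joker hand_counter) := by
  unfold Pre_convert_joker; infer_instance

def pvWitness_convert_joker : (List (String × Int)) := [("J", 1), ("A", 2), ("K", 2)]

def Spec_convert_joker (hand_counter : List (String × Int)) (out : List (String × Int)) : Prop := out = convert_joker_alt hand_counter
instance (hand_counter : List (String × Int)) (out : List (String × Int)) : Decidable (Spec_convert_joker hand_counter out) := by unfold Spec_convert_joker; infer_instance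

-- ===== CLAIM (what is proved, stated in full; the proofs are below) =====
def Claim_equal_convert_joker : Prop := ∀ (hand_counter : List (String × Int)), Dom_convert_joker hand_counter → Pre_convert_joker hand_counter → Spec_convert_joker hand_counter (convert_joker hand_counter)

-- ===== LEMMAS AND PROOFS =====

-- first element of c :: l whose count is a strict running record (= the first element
-- attaining the overall maximum count); proof-only helper characterising the head of
-- the stable descending insertion sort
def pvRecFirst (c : String × Int) : List (String × Int) → String × Int
  | [] => c
  | x :: xs => if c.2 < x.2 then pvRecFirst x xs else pvRecFirst c xs

-- head of the insertion-sort fold (descending, stable) = first running record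
lemma head_foldl_insertBy (l : List (String × Int)) :
    ∀ (c : String × Int) (acc : List (String × Int)),
    (List.foldl (fun acc x => PySem.List.insertBy
        (fun a b => decide ((fun kv : String × Int => kv.2) b < (fun kv : String × Int => kv.2) a)) x acc)
      (c :: acc) l).headD ("", 0) = pvRecFirst c l := by
  induction l with
  | nil => intro c acc; rfl
  | cons x l ih =>
    intro c acc
    rw [List.foldl_cons]
    by_cases h : c.2 < x.2
    · rw [show PySem.List.insertBy
          (fun a b => decide ((fun kv : String × Int => kv.2) b < (fun kv : String × Int => kv.2) a)) x (c :: acc)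
          = x :: c :: acc from by simp [PySem.List.insertBy, h]]
      rw [ih]
      simp [pvRecFirst, h]
    · rw [show PySem.List.insertBy
          (fun a b => decide ((fun kv : String × Int => kv.2) b < (fun kv : String × Int => kv.2) a)) x (c :: acc)
          = c :: PySem.List.insertBy
              (fun a b => decide ((fun kv : String × Int => kv.2) b < (fun kv : String × Int => kv.2) a)) x acc
          from by simp [PySem.List.insertBy, h]]
      rw [ih]
      simp [pvRecFirst, h]

-- the first running record = head of the filter A builds (first element attaining the max)
lemma pvRecFirst_eq_filter_head (l : List (String × Int)) :
    ∀ (c : String × Int),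
    pvRecFirst c l =
      ((c :: l).filter (fun p => p.2 == List.foldl max c.2 (l.map Prod.snd))).headD ("", 0) := by
  induction l with
  | nil => intro c; simp [pvRecFirst]
  | cons x l ih =>
    intro c
    simp only [List.map_cons, List.foldl_cons]
    by_cases h : c.2 < x.2
    · have hm : max c.2 x.2 = x.2 := max_eq_right h.le
      have hle : x.2 ≤ List.foldl max x.2 (l.map Prod.snd) := (PySem.List.le_foldl_max _ _).1
      rw [show pvRecFirst c (x :: l) = pvRecFirst x l from by simp [pvRecFirst, h], ih, hm]
      conv_rhs => rw [List.filter_cons,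
        if_neg (by simp only [beq_iff_eq]; omega :
          ¬ ((c.2 == List.foldl max x.2 (l.map Prod.snd)) = true))]
    · have hm : max c.2 x.2 = c.2 := max_eq_left (by omega)
      have hle : c.2 ≤ List.foldl max c.2 (l.map Prod.snd) := (PySem.List.le_foldl_max _ _).1
      rw [show pvRecFirst c (x :: l) = pvRecFirst c l from by simp [pvRecFirst, h], ih, hm]
      by_cases hc : c.2 = List.foldl max c.2 (l.map Prod.snd)
      · have hcb : (c.2 == List.foldl max c.2 (l.map Prod.snd)) = true := by
          simp only [beq_iff_eq]; omega
        conv_lhs => rw [List.filter_cons, if_pos hcb]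
        conv_rhs => rw [List.filter_cons, if_pos hcb]
        simp
      · rw [List.filter_cons (x := c), List.filter_cons (x := c),
          if_neg (by simp only [beq_iff_eq]; omega :
            ¬ ((c.2 == List.foldl max c.2 (l.map Prod.snd)) = true)),
          if_neg (by simp only [beq_iff_eq]; omega :
            ¬ ((c.2 == List.foldl max c.2 (l.map Prod.snd)) = true)),
          List.filter_cons (x := x),
          if_neg (by simp only [beq_iff_eq]; omega :
            ¬ ((x.2 == List.foldl max c.2 (l.map Prod.snd)) = true))]

-- a fold of max over a list is attained by the start or by some element
lemma foldl_max_mem (l : List Int) : ∀ (a : Int), List.foldl max a l = a ∨ List.foldl max a l ∈ l := by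
  induction l with
  | nil => intro a; left; rfl
  | cons x l ih =>
    intro a
    rw [List.foldl_cons]
    rcases ih (max a x) with h | h
    · rw [h]
      by_cases hx : a ≤ x
      · right; rw [max_eq_right hx]; exact List.mem_cons_self
      · left; exact max_eq_left (by omega)
    · right; exact List.mem_cons_of_mem _ h

-- count of a value among the snds = length of the pair filter A builds
lemma count_snd_eq_filter_length (l : List (String × Int)) (m : Int) :
    (l.map Prod.snd).count m = (l.filter (fun p => p.2 == m)).length := by
  induction l with
  | nil => rfl
  | cons p t ih =>
    by_cases h : p.2 = m <;> simp [h, ih, beq_iff_eq]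

lemma headD_map_fst (l : List (String × Int)) (h : l ≠ []) :
    (l.map Prod.fst).headD "" = (l.headD ("", 0)).1 := by
  cases l with
  | nil => exact absurd rfl h
  | cons p t => rfl

-- The two ports agree on every input (Pre_ only marks where the Python raises).
lemma ports_eq (hc : List (String × Int)) : convert_joker hc = convert_joker_alt hc := by
  unfold convert_joker convert_joker_alt
  cases hl : hc.lookup "J" with
  | none => rfl
  | some n =>
    by_cases h5 : n = 5
    · simp [h5]
    · simp only [h5]
      cases hr : popJ hc with
      | nil => simp [bumpKey]
      | cons r t =>
        rw [List.map_cons, PySem.List.max?_id_cons]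
        simp only [Option.getD_some]
        set M := List.foldl max r.2 (t.map Prod.snd) with hM
        set fl := (r :: t).filter (fun p => p.2 == M) with hfl
        -- fl is nonempty: the max is attained
        have hflne : fl ≠ [] := by
          have hmem := foldl_max_mem (t.map Prod.snd) r.2
          rw [← hM] at hmem
          rcases hmem with h | h
          · have : r ∈ fl := by
              rw [hfl]
              exact List.mem_filter.mpr ⟨List.mem_cons_self, by simp [h]⟩
            exact List.ne_nil_of_mem this
          · rcases List.mem_map.mp h with ⟨p, hp, hps⟩
            have : p ∈ fl := by
              rw [hfl]
              exact List.mem_filter.mpr ⟨List.mem_cons_of_mem _ hp, by simp [hps]⟩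
            exact List.ne_nil_of_mem this
        -- B's sort
        cases hs : PySem.List.sorted (r :: t) (fun kv : String × Int => kv.2) true with
        | nil => exact absurd ((PySem.List.sorted_eq_nil_iff _ _ _).mp hs) (by simp)
        | cons s0 s' =>
          -- the head of the sort is the head of fl
          have hhead : s0 = fl.headD ("", 0) := by
            have h1 := head_foldl_insertBy t r []
            have h2 : PySem.List.sorted (r :: t) (fun kv : String × Int => kv.2) true
                = List.foldl (fun acc x => PySem.List.insertBy
                    (fun a b => decide ((fun kv : String × Int => kv.2) b < (fun kv : String × Int => kv.2) a)) x acc)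
                  [r] t := by
              rw [PySem.List.sorted_rev_eq_foldl_insertBy]
              rfl
            rw [hs] at h2
            have := h2 ▸ h1
            simp only [List.headD_cons] at this
            rw [this, pvRecFirst_eq_filter_head, ← hM, ← hfl]
          have hs0M : s0.2 = M := by
            cases hflc : fl with
            | nil => exact absurd hflc hflne
            | cons a b =>
              have ha : a ∈ List.filter (fun p => p.2 == M) (r :: t) := by
                rw [← hfl, hflc]; exact List.mem_cons_self
              have hpred := (List.mem_filter.mp ha).2
              rw [hhead, hflc]
              simpa using hpred
          -- counts transported along the sort's permutation
          have hperm : ((s0 :: s').map Prod.snd).count M = fl.length := by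
            have hp : (s0 :: s').Perm (r :: t) := hs ▸ PySem.List.sorted_perm _ _ _
            rw [List.Perm.count_eq (hp.map Prod.snd), count_snd_eq_filter_length, ← hfl]
          have hpw : List.Pairwise (fun a b : String × Int => b.2 ≤ a.2) (s0 :: s') :=
            hs ▸ PySem.List.sorted_pairwise_rev _ _
          -- the branch conditions agree
          have hcond : (1 < (s0 :: s').length ∧
              ((s0 :: s').getD 0 ("", 0)).2 = ((s0 :: s').getD 1 ("", 0)).2)
              ↔ ¬ ((fl.map Prod.fst).length = 1) := by
            cases hsc : s' with
            | nil =>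
              constructor
              · intro h
                have := h.1
                simp at this
              · intro h
                exfalso
                apply h
                rw [List.length_map, ← hperm, hsc]
                simp [hs0M]
            | cons s1 s'' =>
              have hcnt : ((s0 :: s1 :: s'').map Prod.snd).count M = fl.length := hsc ▸ hperm
              have hs1le : s1.2 ≤ M := by
                have := (List.pairwise_cons.mp (hsc ▸ hpw)).1 s1 List.mem_cons_self
                omega
              constructor
              · intro hc2
                obtain ⟨-, heq⟩ := hc2
                simp only [List.getD_cons_zero, List.getD_cons_succ] at heq
                have hs1M : s1.2 = M := by rw [← heq]; exact hs0M
                rw [List.length_map, ← hcnt]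
                simp only [List.map_cons, List.count_cons, hs1M, hs0M, beq_self_eq_true,
                  if_true]
                omega
              · intro h
                refine ⟨by simp, ?_⟩
                simp only [List.getD_cons_zero, List.getD_cons_succ]
                by_contra hne
                have hs1M : s1.2 < M := by
                  rw [hs0M] at hne
                  omega
                have hb : (s1.2 == M) = false := by
                  simp only [beq_eq_false_iff_ne, ne_eq]; omega
                -- every element of s'' has snd ≤ s1.2 < M, so the count is exactly 1
                have hall : ∀ y ∈ s'', y.2 ≤ s1.2 :=
                  (List.pairwise_cons.mp (List.pairwise_cons.mp (hsc ▸ hpw)).2).1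
                have hzero : (s''.map Prod.snd).count M = 0 := by
                  rw [List.count_eq_zero]
                  intro hmem
                  rcases List.mem_map.mp hmem with ⟨p, hp, hps⟩
                  have := hall p hp
                  omega
                apply h
                rw [List.length_map, ← hcnt]
                simp only [List.map_cons, List.count_cons, hb, hs0M, beq_self_eq_true,
                  if_true, hzero]
                simp
          -- conclude: the selected keys coincide branch by branch
          by_cases hA : (fl.map Prod.fst).length = 1
          · have hnB : ¬ (1 < (s0 :: s').length ∧
                ((s0 :: s').getD 0 ("", 0)).2 = ((s0 :: s').getD 1 ("", 0)).2) :=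
              fun hx => (hcond.mp hx) hA
            rw [if_pos hA, if_neg hnB]
            rw [headD_map_fst fl hflne]
            simp [hhead]
          · rw [if_neg hA, if_pos (hcond.mpr hA)]

-- ===== VERDICT (by name: the statement is the Claim_ definition above) =====
theorem convert_joker_spec : Claim_equal_convert_joker := by
  intro hc _ _
  unfold Spec_convert_joker
  exact ports_eq hc
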